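-- pv_equiv track=rewrite | github.com/eliottcassidy2000/math | 04-computation/a000568_speedup.py | partitions_odd_parts
-- ===== SOURCE A (Python) =====
-- def partitions_odd_parts(n):
--     """Generate all partitions of n into odd parts (= all partitions of n by Euler)."""
--     # We generate partitions of n into odd parts directly
--     def _gen(remaining, max_part):
--         if remaining == 0:
--             yield []
--             return
--         # max_part must be odd
--         if max_part % 2 == 0:
--             max_part -= 1
--         for k in range(min(remaining, max_part), 0, -2):  # odd parts only
--             for rest in _gen(remaining - k, k):
--                 yield [k] + rest
--     yield from _gen(n, n if n % 2 == 1 else n - 1)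
-- ===== SOURCE B (Python) =====
-- def partitions_odd_parts(n):
--     """Generate all partitions of n into odd parts (= all partitions of n by Euler)."""
--     # Iterative depth-first traversal with an explicit stack instead of recursive
--     # generators; partitions are built front-to-back as prefixes on the stack.
--     stack = [(n, n, [])]
--     while stack:
--         remaining, max_part, prefix = stack.pop()
--         if remaining == 0:
--             yield prefix
--             continue
--         if max_part % 2 == 0:
--             max_part -= 1
--         top = min(remaining, max_part)
--         # push candidate parts smallest-first so the largest part is popped first
--         for k in reversed(range(top, 0, -2)):
--             stack.append((remaining - k, k, prefix + [k]))
-- ===== Notes on version B (the rewrite author's own statement) =====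
-- stated objective: alternative
-- what changed: Replaced A's recursive nested generators (which build each partition by prepending the chosen part to every recursively generated tail) by an iterative depth-first search over an explicit stack of (remaining, max_part, prefix) frames that extends partition prefixes front-to-back, pushing candidate parts in ascending order so the pop order reproduces A's descending enumeration exactly.
import Mathlib
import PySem

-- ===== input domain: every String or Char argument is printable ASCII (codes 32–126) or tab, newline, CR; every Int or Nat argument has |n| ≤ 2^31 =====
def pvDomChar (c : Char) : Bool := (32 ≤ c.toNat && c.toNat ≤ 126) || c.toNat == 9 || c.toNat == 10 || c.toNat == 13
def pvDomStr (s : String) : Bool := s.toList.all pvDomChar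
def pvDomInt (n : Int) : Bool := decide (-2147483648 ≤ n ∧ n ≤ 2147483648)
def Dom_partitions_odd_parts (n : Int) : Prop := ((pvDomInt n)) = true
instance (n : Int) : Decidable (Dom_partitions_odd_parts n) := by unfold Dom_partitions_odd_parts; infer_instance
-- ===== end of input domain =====

-- B replaces A's recursive nested generators by an iterative depth-first loop over an
-- explicit stack of (remaining, max_part, prefix) frames (objective: alternative).

-- Normal forms of the two specific ranges the ports use (just unfolding pyRange).
theorem pyRange_negTwo (a : Int) :
    PySem.List.pyRange a 0 (-2)
      = (List.range (if 0 < a then ((a+1)/2).toNat else 0)).map (fun k : Nat => a + (-2)*(k:Int)) := by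
  unfold PySem.List.pyRange
  rw [if_neg (by norm_num : ¬ ((-2:Int) = 0)), if_neg (by norm_num : ¬ ((0:Int) < -2)),
    (by norm_num : -(-2:Int) = 2), (by ring : a - 0 + 2 - 1 = a + 1)]

theorem foldl_push {a b : Type} (f : a → b) (l : List a) (st : List b) :
    l.foldl (fun s k => f k :: s) st = (l.map f).reverse ++ st := by
  induction l generalizing st with
  | nil => rfl
  | cons x xs ih => simp [ih]

theorem foldl_push_rev {a b : Type} (f : a → b) (l : List a) (st : List b) :
    l.reverse.foldl (fun s k => f k :: s) st = l.map f ++ st := by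
  rw [foldl_push, List.map_reverse, List.reverse_reverse]

-- Membership bound for the descending step -2 range used by both ports (termination).
theorem mem_negTwoRange {x a : Int} (h : x ∈ PySem.List.pyRange a 0 (-2)) : 0 < x ∧ x ≤ a := by
  rw [pyRange_negTwo] at h
  simp only [List.mem_map, List.mem_range] at h
  obtain ⟨k, hk, rfl⟩ := h
  split at hk <;> omega

-- ===== PORT A =====
-- _gen(remaining, max_part) of A, transliterated; recursion justified by remaining.toNat.
def genA (r m : Int) : List (List Int) :=
  if r = 0 then [[]]
  else
    let m2 := if PySem.Int.mod m 2 = 0 then m - 1 else m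
    (PySem.List.pyRange (min r m2) 0 (-2)).attach.flatMap
      (fun k => (genA (r - k.1) k.1).map (fun rest => k.1 :: rest))
termination_by r.toNat
decreasing_by
  have h := mem_negTwoRange k.2
  have : k.1 ≤ r := le_trans h.2 (min_le_left _ _)
  omega

def partitions_odd_parts (n : Int) : List (List Int) :=
  genA n (if PySem.Int.mod n 2 = 1 then n else n - 1)

-- ===== PORT B =====
-- Stack measure for the while-loop's termination: Σ (remaining.toNat + 1)!.
def stackMeasure (s : List (Int × Int × List Int)) : Nat :=
  (s.map (fun f => (f.1.toNat + 1).factorial)).sum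

-- the decreasing bound for one expansion step of the while loop
theorem expand_measure_lt (r m2 : Int)
    (rest : List (Int × Int × List Int)) (p : List Int) :
    stackMeasure
      (((PySem.List.pyRange (min r m2) 0 (-2)).map
          (fun k => (r - k, k, p ++ [k]))) ++ rest)
      < stackMeasure ((r, m2, p) :: rest) := by
  have hkey : ∀ l : List Int, (∀ x ∈ l, 0 < x ∧ x ≤ min r m2) → l.length ≤ r.toNat →
      ((l.map (fun k => (r - k, k, p ++ [k]))).map
        (fun f => (f.1.toNat + 1).factorial)).sum < (r.toNat + 1).factorial := by
    intro l hmem hlen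
    rcases l with _ | ⟨x, xs⟩
    · simpa using Nat.factorial_pos _
    · have hr0 : 0 < r := lt_of_lt_of_le (hmem x (by simp)).1
        (le_trans (hmem x (by simp)).2 (min_le_left _ _))
      have hrw : ((x :: xs).map (fun k => ((r - k : Int), k, p ++ [k]))).map
            (fun f => (f.1.toNat + 1).factorial)
          = (x :: xs).map (fun k => ((r - k : Int).toNat + 1).factorial) := by
        rw [List.map_map]
        rfl
      have hsum := List.sum_le_card_nsmul
        ((x :: xs).map (fun k => ((r - k : Int).toNat + 1).factorial)) r.toNat.factorial
        (by
          intro v hv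
          simp only [List.mem_map] at hv
          obtain ⟨k, hk, rfl⟩ := hv
          have := hmem k hk
          exact Nat.factorial_le (by omega))
      simp only [List.length_map, smul_eq_mul] at hsum
      calc (((x :: xs).map (fun k => ((r - k : Int), k, p ++ [k]))).map
              (fun f => (f.1.toNat + 1).factorial)).sum
          ≤ (x :: xs).length * r.toNat.factorial := by rw [hrw]; exact hsum
        _ ≤ r.toNat * r.toNat.factorial := Nat.mul_le_mul_right _ hlen
        _ < (r.toNat + 1) * r.toNat.factorial := by
            exact (Nat.mul_lt_mul_right (Nat.factorial_pos _)).mpr (by omega)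
        _ = (r.toNat + 1).factorial := rfl
  have hmem : ∀ x ∈ PySem.List.pyRange (min r m2) 0 (-2), 0 < x ∧ x ≤ min r m2 :=
    fun _ hx => mem_negTwoRange hx
  have hlen : (PySem.List.pyRange (min r m2) 0 (-2)).length ≤ r.toNat := by
    rw [pyRange_negTwo]
    simp only [List.length_map, List.length_range]
    split <;> omega
  have := hkey _ hmem hlen
  simp only [stackMeasure, List.map_append, List.sum_append, List.map_cons, List.sum_cons]
  omega

-- the while loop of B: the Lean list head is the Python stack's top (list end)
def stackLoop (stack : List (Int × Int × List Int)) : List (List Int) :=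
  match stack with
  | [] => []
  | (r, m, p) :: rest =>
    if r = 0 then p :: stackLoop rest
    else
      stackLoop ((PySem.List.pyRange
          (min r (if PySem.Int.mod m 2 = 0 then m - 1 else m)) 0 (-2)).reverse.foldl
        (fun st k => (r - k, k, p ++ [k]) :: st) rest)
termination_by stackMeasure stack
decreasing_by
  · have := Nat.factorial_pos (r.toNat + 1)
    simp only [stackMeasure, List.map_cons, List.sum_cons]
    omega
  · rw [foldl_push_rev]
    exact expand_measure_lt r (if PySem.Int.mod m 2 = 0 then m - 1 else m) rest p

def partitions_odd_parts_alt (n : Int) : List (List Int) := stackLoop [(n, n, [])]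

-- ===== PRECONDITION & SPEC =====
def Spec_partitions_odd_parts (n : Int) (out : List (List Int)) : Prop := out = partitions_odd_parts_alt n
instance (n : Int) (out : List (List Int)) : Decidable (Spec_partitions_odd_parts n out) := by unfold Spec_partitions_odd_parts; infer_instance

-- ===== CLAIM (what is proved, stated in full; the proofs are below) =====
def Claim_equal_partitions_odd_parts : Prop := ∀ (n : Int), Dom_partitions_odd_parts n → Spec_partitions_odd_parts n (partitions_odd_parts n)

-- ===== LEMMAS AND PROOFS =====

-- let-free unfolding of genA
theorem genA_eq (r m : Int) :
    genA r m = if r = 0 then [[]] else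
      (PySem.List.pyRange (min r (if PySem.Int.mod m 2 = 0 then m - 1 else m)) 0 (-2)).attach.flatMap
        (fun k => (genA (r - k.1) k.1).map (fun rest => k.1 :: rest)) := by
  rw [genA]

-- one node of the search tree: its expansion frames produce exactly its genA block
theorem expand_block (r m : Int) (p : List Int) (hr : ¬ r = 0) :
    ((PySem.List.pyRange
          (min r (if PySem.Int.mod m 2 = 0 then m - 1 else m)) 0 (-2)).map
        (fun k => ((r - k : Int), k, p ++ [k]))).flatMap
      (fun f => (genA f.1 f.2.1).map (fun q => f.2.2 ++ q))
    = (genA r m).map (fun q => p ++ q) := by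
  rw [genA_eq, if_neg hr]
  simp only [List.flatMap_map, List.map_flatMap, List.map_map]
  simp [Function.comp_def]

theorem stackLoop_eq (s : List (Int × Int × List Int)) :
    stackLoop s = s.flatMap (fun f => (genA f.1 f.2.1).map (fun q => f.2.2 ++ q)) := by
  fun_induction stackLoop s with
  | case1 => simp
  | case2 m p rest ih =>
    have h : List.map (fun q => p ++ q) (genA 0 m) = [p] := by rw [genA_eq]; simp
    simp [List.flatMap_cons, ih, h]
  | case3 r m p rest h ih =>
    simp only [dite_eq_ite] at ih
    rw [ih, foldl_push_rev, List.flatMap_append, List.flatMap_cons, expand_block r m p h]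

theorem genA_adjust (n : Int) :
    genA n n = genA n (if PySem.Int.mod n 2 = 1 then n else n - 1) := by
  have hm : ∀ a : Int, PySem.Int.mod a 2 = a % 2 :=
    fun a => PySem.Int.mod_eq_emod_of_pos (by norm_num)
  by_cases h1 : PySem.Int.mod n 2 = 1
  · rw [if_pos h1]
  · rw [if_neg h1]
    by_cases h0 : n = 0
    · subst h0
      rw [genA_eq, genA_eq]
      simp
    · have h2 : n % 2 = 0 := by rw [hm] at h1; omega
      rw [genA_eq, genA_eq, if_neg h0, if_neg h0]
      have e1 : (if PySem.Int.mod n 2 = 0 then n - 1 else n) = n - 1 := by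
        rw [hm, if_pos h2]
      have e2 : (if PySem.Int.mod (n - 1) 2 = 0 then n - 1 - 1 else n - 1) = n - 1 := by
        rw [hm, if_neg (by omega)]
      rw [e1, e2]

-- ===== VERDICT (by name: the statement is the Claim_ definition above) =====
theorem partitions_odd_parts_spec : Claim_equal_partitions_odd_parts := by
  intro n _
  show partitions_odd_parts n = partitions_odd_parts_alt n
  rw [partitions_odd_parts, partitions_odd_parts_alt, stackLoop_eq, ← genA_adjust]
  simp
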